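-- pv_equiv track=rewrite | github.com/grysik666/Team-Project | Algorithm.py | BFS_vertex
-- ===== SOURCE A (Python) =====
-- def BFS_vertex(G, v):
--     """_summary_
--
--     Args:
--         G (_type_): _description_
--         v (_type_): _description_
--     """
--     '''v wierzcholek z G
--     zwraca wierzcholki do ktorych mozna w G dojsc z v'''
--     n = len(G)
--     colors = [0]*n
--     colors[v] = 1
--     parent = [None]*n
--     dist = [-1]*n
--     dist[v] = 0
--     Q = [v]
--     while len(Q) != 0:
--         u = Q[0]
--         Q.pop(0)
--         neighbours = []
--         for i in range(n):
--             if G[u][i] != 0: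
--                 neighbours.append(i)
--         for w in neighbours:
--             if colors[w] == 0:
--                 colors[w] = 1
--                 parent[w] = u
--                 dist[w] = dist[u] + 1
--                 Q.append(w)
--         colors[u] = 2
--     results = []
--     for i in range(n):
--         if dist[i] > -1:
--             results.append(i)
--     return results
-- ===== SOURCE B (Python) =====
-- def BFS_vertex(G, v):
--     '''Reachable vertices from v in adjacency matrix G, ascending.
--     Depth-first traversal with an explicit stack instead of A's BFS
--     queue with colors/parent/dist bookkeeping.'''
--     n = len(G)
--     visited = [False] * n
--     visited[v] = True
--     stack = [v]
--     while stack: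
--         u = stack.pop()
--         for i in range(n):
--             if G[u][i] != 0 and not visited[i]:
--                 visited[i] = True
--                 stack.append(i)
--     return [i for i in range(n) if visited[i]]
-- ===== Notes on version B (the rewrite author's own statement) =====
-- stated objective: alternative
-- what changed: Replaces A's FIFO breadth-first search with colors/parent/dist bookkeeping by a LIFO depth-first traversal over a single boolean visited array; the reachable set is read off the visited array in ascending index order, so the returned list is identical.
-- outside the precondition, e.g. on BFS_vertex([[0, 0], [0]], 0): A returns [0], B returns [0]
import Mathlib
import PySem

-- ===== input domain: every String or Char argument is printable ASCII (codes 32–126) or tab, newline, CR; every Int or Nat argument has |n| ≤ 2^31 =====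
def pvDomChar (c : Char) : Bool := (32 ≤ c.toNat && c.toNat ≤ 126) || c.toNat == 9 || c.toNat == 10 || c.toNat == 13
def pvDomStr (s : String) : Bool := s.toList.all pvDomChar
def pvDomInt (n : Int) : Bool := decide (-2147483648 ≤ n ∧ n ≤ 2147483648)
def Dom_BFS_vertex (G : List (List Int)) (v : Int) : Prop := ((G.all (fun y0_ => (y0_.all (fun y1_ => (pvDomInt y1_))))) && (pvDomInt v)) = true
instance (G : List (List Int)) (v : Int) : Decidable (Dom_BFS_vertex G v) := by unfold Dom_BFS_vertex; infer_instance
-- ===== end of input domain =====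

-- B replaces A's BFS queue with colors/parent/dist bookkeeping by a plain
-- depth-first traversal over one boolean visited array; same return value.

-- ===== PORT A =====
-- one step of A's inner 'for w in neighbours' loop; state = (colors, parent, dist, Q)
def bfsStep (u : Int) (s : List Int × List (Option Int) × List Int × List Int) (w : Int) :
    List Int × List (Option Int) × List Int × List Int :=
  if PySem.List.pyGetD s.1 w 0 = 0 then
    (PySem.List.pySetD s.1 w 1, PySem.List.pySetD s.2.1 w (some u),
     PySem.List.pySetD s.2.2.1 w (PySem.List.pyGetD s.2.2.1 u (-1) + 1),
     s.2.2.2 ++ [w])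
  else s

-- A's 'while len(Q) != 0' loop; fuel strictly dominates the loop's iteration
-- count under Pre_ (each iteration pops one vertex, each vertex is enqueued once)
def bfsLoopA (G : List (List Int)) (n : Nat) :
    Nat → List Int → List (Option Int) → List Int → List Int →
    List Int × List (Option Int) × List Int
  | 0, colors, parent, dist, _ => (colors, parent, dist)
  | _ + 1, colors, parent, dist, [] => (colors, parent, dist)
  | fuel + 1, colors, parent, dist, u :: Qrest =>
    let neighbours := (PySem.List.pyRange 0 (n : Int) 1).foldl
      (fun acc i => if PySem.List.pyGetD (PySem.List.pyGetD G u []) i 0 ≠ 0 then acc ++ [i] else acc) []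
    let s := neighbours.foldl (bfsStep u) (colors, parent, dist, Qrest)
    bfsLoopA G n fuel (PySem.List.pySetD s.1 u 2) s.2.1 s.2.2.1 s.2.2.2

def BFS_vertex (G : List (List Int)) (v : Int) : List Int :=
  let n := G.length
  let colors := PySem.List.pySetD (List.replicate n (0 : Int)) v 1
  let parent : List (Option Int) := List.replicate n none
  let dist := PySem.List.pySetD (List.replicate n (-1 : Int)) v 0
  let r := bfsLoopA G n (2 * n + 1) colors parent dist [v]
  (PySem.List.pyRange 0 (n : Int) 1).foldl
    (fun results i => if PySem.List.pyGetD r.2.2 i (-1) > -1 then results ++ [i] else results) []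

-- ===== PORT B =====
-- one step of B's 'for i in range(n)' scan; state = (visited, stack)
def dfsStep (G : List (List Int)) (u : Int) (s : List Bool × List Int) (i : Int) :
    List Bool × List Int :=
  if PySem.List.pyGetD (PySem.List.pyGetD G u []) i 0 ≠ 0 ∧ PySem.List.pyGetD s.1 i false = false then
    (PySem.List.pySetD s.1 i true, i :: s.2)
  else s

-- B's 'while stack' loop; the stack's top is the HEAD of the list
-- (push = cons, pop = head), matching Python's append / pop() at the end
def dfsLoopB (G : List (List Int)) (n : Nat) : Nat → List Bool → List Int → List Bool
  | 0, visited, _ => visited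
  | _ + 1, visited, [] => visited
  | fuel + 1, visited, u :: rest =>
    let s := (PySem.List.pyRange 0 (n : Int) 1).foldl (dfsStep G u) (visited, rest)
    dfsLoopB G n fuel s.1 s.2

def BFS_vertex_alt (G : List (List Int)) (v : Int) : List Int :=
  let n := G.length
  let visited := PySem.List.pySetD (List.replicate n false) v true
  let r := dfsLoopB G n (2 * n + 1) visited [v]
  (PySem.List.pyRange 0 (n : Int) 1).foldl
    (fun results i => if PySem.List.pyGetD r i false = true then results ++ [i] else results) []

-- ===== PRECONDITION & SPEC =====
-- Pre_ excludes exactly the inputs where A raises IndexError (start vertex v out of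
-- range of len(G), or a scanned row shorter than len(G)); requiring EVERY row to have
-- length ≥ len(G) is slightly stronger than the exact raise condition, because a
-- too-short row only raises when its vertex is reachable from v — on such inputs A
-- and B both return the reachable set anyway.
def Pre_BFS_vertex (G : List (List Int)) (v : Int) : Prop :=
  -(G.length : Int) ≤ v ∧ v < (G.length : Int) ∧ ∀ row ∈ G, G.length ≤ row.length
instance (G : List (List Int)) (v : Int) : Decidable (Pre_BFS_vertex G v) := by
  unfold Pre_BFS_vertex; infer_instance

def pvWitness_BFS_vertex : List (List Int) × Int := ([[0, 1], [0, 0]], 0)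

def Spec_BFS_vertex (G : List (List Int)) (v : Int) (out : List Int) : Prop := out = BFS_vertex_alt G v
instance (G : List (List Int)) (v : Int) (out : List Int) : Decidable (Spec_BFS_vertex G v out) := by
  unfold Spec_BFS_vertex; infer_instance

-- ===== CLAIM (what is proved, stated in full; the proofs are below) =====
def Claim_equal_BFS_vertex : Prop := ∀ (G : List (List Int)) (v : Int),
  Dom_BFS_vertex G v → Pre_BFS_vertex G v → Spec_BFS_vertex G v (BFS_vertex G v)

-- ===== LEMMAS AND PROOFS =====

-- the adjacency relation both programs traverse (indices below len(G))
def Edge (G : List (List Int)) (a b : Nat) : Prop :=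
  a < G.length ∧ b < G.length ∧ (G.getD a []).getD b 0 ≠ 0

def ReachG (G : List (List Int)) (t k : Nat) : Prop := Relation.ReflTransGen (Edge G) t k

-- 'the Int x denotes row/column k of an n×n matrix' (Python's negative indexing)
def PRep (n : Nat) (x : Int) (k : Nat) : Prop := k < n ∧ (x = (k : Int) ∨ x + (n : Int) = (k : Int))

lemma prep_self {n k : Nat} (h : k < n) : PRep n (k : Int) k := ⟨h, Or.inl rfl⟩

lemma prep_unique {n : Nat} {x : Int} {k k' : Nat} (h : PRep n x k) (h' : PRep n x k') : k = k' := by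
  obtain ⟨hk, hx⟩ := h; obtain ⟨hk', hx'⟩ := h'; omega

lemma getDset {α : Type} (xs : List α) (j k : Nat) (v d : α) (hj : j < xs.length) :
    (xs.set j v).getD k d = if k = j then v else xs.getD k d := by
  rcases eq_or_ne k j with rfl | hne
  · simp [List.getD_eq_getElem?_getD, hj]
  · simp [List.getD_eq_getElem?_getD, hne, Ne.symm hne]

lemma rep_pyGetD {α : Type} {n : Nat} {x : Int} {k : Nat} (h : PRep n x k)
    (xs : List α) (hxs : xs.length = n) (d : α) :
    PySem.List.pyGetD xs x d = xs.getD k d := by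
  obtain ⟨hk, hx | hx⟩ := h
  · subst hx; simp
  · have hm : x = -(((n - k : Nat) : Nat) : Int) := by omega
    have hidx : xs.length - (n - k) = k := by omega
    rw [hm, PySem.List.pyGetD_neg_natCast xs (n - k) d (by omega) (by omega)]
    simp only [hidx]
    rw [List.getD_eq_getElem?_getD, List.getElem?_eq_getElem (by omega)]
    rfl

lemma rep_pySetD {α : Type} {n : Nat} {x : Int} {k : Nat} (h : PRep n x k)
    (xs : List α) (hxs : xs.length = n) (v : α) :
    PySem.List.pySetD xs x v = xs.set k v := by
  obtain ⟨hk, hx | hx⟩ := h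
  · subst hx; simp
  · have hx0 : ¬ 0 ≤ x := by omega
    have hxn : -(xs.length : Int) ≤ x := by omega
    simp only [PySem.List.pySetD, PySem.List.pySet?, PySem.List.pyIdx?, if_neg hx0, if_pos hxn,
      Option.map_some, Option.getD_some]
    congr 1
    omega

lemma reach_closed (G : List (List Int)) (t : Nat) (P : Nat → Prop) (hPt : P t)
    (hcl : ∀ k, k < G.length → P k → ∀ j, Edge G k j → P j) :
    ∀ k, ReachG G t k → P k := by
  intro k h
  induction h with
  | refl => exact hPt
  | tail _ e ih => exact hcl _ e.1 ih _ e

lemma testB_iff (G : List (List Int)) (u : Int) (ku j : Nat) (hrep : PRep G.length u ku)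
    (hj : j < G.length) :
    (PySem.List.pyGetD (PySem.List.pyGetD G u []) ((j : Nat) : Int) 0 ≠ 0) ↔ Edge G ku j := by
  rw [rep_pyGetD hrep G rfl]
  simp [Edge, hrep.1, hj]

-- what the scan of row ku does to (visited, stack), for any index list l drawn from range(n)
def FoldBOut (G : List (List Int)) (ku : Nat) (l : List Int)
    (vis : List Bool) (st : List Int) (r : List Bool × List Int) : Prop :=
  r.1.length = G.length
  ∧ (∀ k, vis.getD k false = true → r.1.getD k false = true)
  ∧ (∀ k, k < G.length → r.1.getD k false = true → vis.getD k false = true ∨ Edge G ku k)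
  ∧ (∀ x ∈ r.2, x ∈ st ∨ ∃ j : Nat, x = (j : Int) ∧ j < G.length ∧
        vis.getD j false = false ∧ r.1.getD j false = true)
  ∧ (∀ x ∈ st, x ∈ r.2)
  ∧ (∀ j, j < G.length → vis.getD j false = false → r.1.getD j false = true → ((j : Int) ∈ r.2))
  ∧ (2 * r.1.count false + r.2.length ≤ 2 * vis.count false + st.length)
  ∧ (∀ x ∈ l, ∀ j : Nat, x = (j : Int) → Edge G ku j → r.1.getD j false = true)

lemma foldB_spec (G : List (List Int)) (u : Int) (ku : Nat) (hrep : PRep G.length u ku)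
    (l : List Int) :
    ∀ vis st, vis.length = G.length →
      (∀ x ∈ l, ∃ j : Nat, x = (j : Int) ∧ j < G.length) →
      FoldBOut G ku l vis st (l.foldl (dfsStep G u) (vis, st)) := by
  induction l with
  | nil =>
    intro vis st hlen _
    simp only [List.foldl_nil]
    refine ⟨hlen, fun k h => h, fun k _ h => Or.inl h, fun x hx => Or.inl hx,
      fun x hx => hx, ?_, le_refl _, by simp⟩
    intro j _ h0 h1; rw [h0] at h1; exact Bool.noConfusion h1
  | cons x l ihl =>
    intro vis st hlen hl
    obtain ⟨j, rfl, hj⟩ := hl _ (List.mem_cons_self)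
    have hl' : ∀ y ∈ l, ∃ j : Nat, y = (j : Int) ∧ j < G.length :=
      fun y hy => hl y (List.mem_cons_of_mem _ hy)
    have hjl : j < vis.length := by omega
    have hgetj : vis.getD j false = vis[j] := by
      rw [List.getD_eq_getElem?_getD, List.getElem?_eq_getElem hjl]; rfl
    simp only [List.foldl_cons]
    by_cases hfire : PySem.List.pyGetD (PySem.List.pyGetD G u []) ((j : Nat) : Int) 0 ≠ 0 ∧
        PySem.List.pyGetD vis ((j : Nat) : Int) false = false
    · -- the scan visits j and pushes it
      have hvj : vis.getD j false = false := by
        have := hfire.2; rwa [PySem.List.pyGetD_natCast] at this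
      have hedge : Edge G ku j := (testB_iff G u ku j hrep hj).1 hfire.1
      have hstep : dfsStep G u (vis, st) ((j : Nat) : Int) = (vis.set j true, ((j : Nat) : Int) :: st) := by
        unfold dfsStep; rw [if_pos hfire]; simp
      rw [hstep]
      have hlen1 : (vis.set j true).length = G.length := by simp [hlen]
      obtain ⟨a, b, c, d, h, i, f, g⟩ := ihl (vis.set j true) (((j : Nat) : Int) :: st) hlen1 hl'
      have hself : (vis.set j true).getD j false = true := by
        rw [getDset _ _ _ _ _ hjl]; simp
      have hother : ∀ k, k ≠ j → (vis.set j true).getD k false = vis.getD k false := by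
        intro k hk; rw [getDset _ _ _ _ _ hjl, if_neg hk]
      refine ⟨a, ?_, ?_, ?_, ?_, ?_, ?_, ?_⟩
      · intro k hk
        by_cases hkj : k = j
        · subst hkj; exact b k hself
        · exact b k (by rw [hother k hkj]; exact hk)
      · intro k hk hr
        rcases c k hk hr with h1 | h2
        · by_cases hkj : k = j
          · subst hkj; exact Or.inr hedge
          · rw [hother k hkj] at h1; exact Or.inl h1
        · exact Or.inr h2
      · intro y hy
        rcases d y hy with hy1 | ⟨j', rfl, hj', hvf, hvt⟩
        · rcases List.mem_cons.1 hy1 with rfl | hy2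
          · exact Or.inr ⟨j, rfl, hj, hvj, b j hself⟩
          · exact Or.inl hy2
        · have hj'j : j' ≠ j := by
            intro hh; subst hh; rw [hself] at hvf; exact Bool.noConfusion hvf
          rw [hother j' hj'j] at hvf
          exact Or.inr ⟨j', rfl, hj', hvf, hvt⟩
      · intro y hy; exact h y (List.mem_cons_of_mem _ hy)
      · intro j' hj' hvf hvt
        by_cases hjj : j' = j
        · subst hjj; exact h _ List.mem_cons_self
        · refine i j' hj' ?_ hvt
          rw [hother j' hjj]; exact hvf
      · have hgf : vis[j] = false := by rw [← hgetj]; exact hvj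
        have hpos : 0 < vis.count false := List.count_pos_iff.mpr (by rw [← hgf]; exact List.getElem_mem hjl)
        have hc : (vis.set j true).count false = vis.count false - 1 := by
          rw [List.count_set hjl]; simp [hgf]
        refine le_trans f ?_
        rw [hc]; simp only [List.length_cons]; omega
      · intro y hy j' hyj' he'
        rcases List.mem_cons.1 hy with rfl | hy2
        · have : j = j' := Int.natCast_inj.mp hyj'
          subst this; exact b j hself
        · exact g y hy2 j' hyj' he'
    · -- nothing happens at this index
      have hstep : dfsStep G u (vis, st) ((j : Nat) : Int) = (vis, st) := by
        unfold dfsStep; rw [if_neg hfire]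
      rw [hstep]
      obtain ⟨a, b, c, d, h, i, f, g⟩ := ihl vis st hlen hl'
      refine ⟨a, b, c, d, h, i, f, ?_⟩
      · intro y hy j' hyj' he'
        rcases List.mem_cons.1 hy with rfl | hy2
        · have hjj' : j = j' := Int.natCast_inj.mp hyj'
          subst hjj'
          have ht1 : PySem.List.pyGetD (PySem.List.pyGetD G u []) ((j : Nat) : Int) 0 ≠ 0 :=
            (testB_iff G u ku j hrep hj).2 he'
          have ht2 : ¬ PySem.List.pyGetD vis ((j : Nat) : Int) false = false := by
            intro hh; exact hfire ⟨ht1, hh⟩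
          rw [PySem.List.pyGetD_natCast] at ht2
          have : vis.getD j false = true := by
            cases hb : vis.getD j false
            · exact absurd hb ht2
            · rfl
          exact b j this
        · exact g y hy2 j' hyj' he'

-- invariant of B's while-loop
def InvB (G : List (List Int)) (t : Nat) (vis : List Bool) (st : List Int) : Prop :=
  vis.length = G.length
  ∧ vis.getD t false = true
  ∧ (∀ x ∈ st, ∃ k, PRep G.length x k ∧ vis.getD k false = true)
  ∧ (∀ k, k < G.length → vis.getD k false = true → ReachG G t k)
  ∧ (∀ k, k < G.length → vis.getD k false = true →
       (∀ x ∈ st, ∀ k', PRep G.length x k' → k' ≠ k) →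
       ∀ j, Edge G k j → vis.getD j false = true)

lemma loopB_spec (G : List (List Int)) (t : Nat) :
    ∀ fuel vis st, InvB G t vis st → 2 * vis.count false + st.length ≤ fuel →
    ∀ k, k < G.length →
      ((dfsLoopB G G.length fuel vis st).getD k false = true ↔ ReachG G t k) := by
  intro fuel
  induction fuel with
  | zero =>
    intro vis st hinv hmu k hk
    obtain ⟨hlen, hvt, hst, hsub, hcl⟩ := hinv
    have hc0 : vis.count false = 0 := by omega
    simp only [dfsLoopB]
    constructor
    · exact hsub k hk
    · intro _
      cases hb : vis.getD k false
      · exfalso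
        have hkl : k < vis.length := by omega
        have hgf : vis[k] = false := by
          rw [List.getD_eq_getElem?_getD, List.getElem?_eq_getElem hkl] at hb; exact hb
        have : 0 < vis.count false := List.count_pos_iff.mpr (by rw [← hgf]; exact List.getElem_mem hkl)
        omega
      · rfl
  | succ fuel ihf =>
    intro vis st hinv hmu k hk
    obtain ⟨hlen, hvt, hst, hsub, hcl⟩ := hinv
    cases st with
    | nil =>
      simp only [dfsLoopB]
      constructor
      · exact hsub k hk
      · intro hr
        exact reach_closed G t (fun k => vis.getD k false = true) hvt
          (fun k hkn hPk j e => hcl k hkn hPk (by simp) j e) k hr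
    | cons u rest =>
      obtain ⟨ku, hrepu, hvku⟩ := hst u List.mem_cons_self
      simp only [dfsLoopB]
      have hlpy : ∀ x ∈ PySem.List.pyRange 0 (G.length : Int) 1, ∃ j : Nat, x = (j : Int) ∧ j < G.length := by
        intro x hx
        rw [PySem.List.mem_pyRange_one] at hx
        exact ⟨x.toNat, by omega, by omega⟩
      obtain ⟨a, b, c, d, h, i, f, g⟩ :=
        foldB_spec G u ku hrepu (PySem.List.pyRange 0 (G.length : Int) 1) vis rest hlen hlpy
      apply ihf _ _ ?_ ?_ k hk
      · refine ⟨a, b t hvt, ?_, ?_, ?_⟩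
        · intro x hx
          rcases d x hx with hx1 | ⟨j, rfl, hj, _, hvt'⟩
          · obtain ⟨k', hrep', hv'⟩ := hst x (List.mem_cons_of_mem _ hx1)
            exact ⟨k', hrep', b _ hv'⟩
          · exact ⟨j, prep_self hj, hvt'⟩
        · intro k' hk' hv'
          rcases c k' hk' hv' with h1 | h2
          · exact hsub k' hk' h1
          · exact Relation.ReflTransGen.tail (hsub ku hrepu.1 hvku) h2
        · intro k' hk' hv' hnotin j e
          by_cases hkk : k' = ku
          · subst hkk
            refine g ((j : Nat) : Int) ?_ j rfl e
            rw [PySem.List.mem_pyRange_one]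
            have := e.2.1
            omega
          · by_cases hvk : vis.getD k' false = true
            · refine b _ (hcl k' hk' hvk ?_ j e)
              intro x hx k'' hrep''
              rcases List.mem_cons.1 hx with rfl | hx2
              · have : k'' = ku := prep_unique hrep'' hrepu
                omega
              · exact hnotin x (h x hx2) k'' hrep''
            · have hvf : vis.getD k' false = false := by
                cases hb : vis.getD k' false
                · rfl
                · exact absurd hb hvk
              exact absurd rfl (hnotin _ (i k' hk' hvf hv') k' (prep_self hk'))
      · refine le_trans f ?_
        simp only [List.length_cons] at hmu; omega

-- what A's inner loop over 'neighbours' does; l is already filtered by the row test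
def FoldAOut (G : List (List Int)) (ku : Nat) (l : List Int)
    (colors _dist : List Int) (Q : List Int)
    (r : List Int × List (Option Int) × List Int × List Int) : Prop :=
  r.1.length = G.length ∧ r.2.2.1.length = G.length
  ∧ (∀ k, colors.getD k 0 ≠ 0 → r.1.getD k 0 ≠ 0)
  ∧ (∀ k, k < G.length → r.1.getD k 0 ≠ 0 → colors.getD k 0 ≠ 0 ∨ Edge G ku k)
  ∧ (∀ x ∈ r.2.2.2, x ∈ Q ∨ ∃ j : Nat, x = (j : Int) ∧ j < G.length ∧
        colors.getD j 0 = 0 ∧ r.1.getD j 0 ≠ 0)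
  ∧ (∀ x ∈ Q, x ∈ r.2.2.2)
  ∧ (∀ j, j < G.length → colors.getD j 0 = 0 → r.1.getD j 0 ≠ 0 → ((j : Int) ∈ r.2.2.2))
  ∧ (2 * r.1.countP (· == (0 : Int)) + r.2.2.2.length ≤ 2 * colors.countP (· == (0 : Int)) + Q.length)
  ∧ (∀ x ∈ l, ∀ j : Nat, x = (j : Int) → r.1.getD j 0 ≠ 0)
  ∧ (∀ k, k < G.length → (r.2.2.1.getD k (-1) > -1 ↔ r.1.getD k 0 ≠ 0))
  ∧ r.1.getD ku 0 ≠ 0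

lemma foldA_spec (G : List (List Int)) (u : Int) (ku : Nat) (hrep : PRep G.length u ku)
    (l : List Int) :
    ∀ colors parent dist Q, colors.length = G.length → dist.length = G.length →
      (∀ k, k < G.length → (dist.getD k (-1) > -1 ↔ colors.getD k 0 ≠ 0)) →
      colors.getD ku 0 ≠ 0 →
      (∀ x ∈ l, ∃ j : Nat, x = (j : Int) ∧ j < G.length ∧ Edge G ku j) →
      FoldAOut G ku l colors dist Q (l.foldl (bfsStep u) (colors, parent, dist, Q)) := by
  induction l with
  | nil =>
    intro colors parent dist Q hclen hdlen hlink hku _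
    simp only [List.foldl_nil]
    refine ⟨hclen, hdlen, fun k h => h, fun k _ h => Or.inl h, fun x hx => Or.inl hx,
      fun x hx => hx, ?_, le_refl _, by simp, hlink, hku⟩
    intro j _ h0 h1; exact absurd h0 h1
  | cons x l ihl =>
    intro colors parent dist Q hclen hdlen hlink hku hl
    obtain ⟨j, rfl, hj, hedge⟩ := hl _ List.mem_cons_self
    have hl' : ∀ y ∈ l, ∃ j : Nat, y = (j : Int) ∧ j < G.length ∧ Edge G ku j :=
      fun y hy => hl y (List.mem_cons_of_mem _ hy)
    have hjl : j < colors.length := by omega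
    have hjld : j < dist.length := by omega
    simp only [List.foldl_cons]
    by_cases hfire : PySem.List.pyGetD colors ((j : Nat) : Int) 0 = 0
    · have hcj : colors.getD j 0 = 0 := by rwa [PySem.List.pyGetD_natCast] at hfire
      have hjku : j ≠ ku := fun hh => hku (by rw [← hh]; exact hcj)
      have hdku : PySem.List.pyGetD dist u (-1) = dist.getD ku (-1) := rep_pyGetD hrep dist hdlen (-1)
      have hdkupos : dist.getD ku (-1) > -1 := (hlink ku hrep.1).2 hku
      have hstep : bfsStep u (colors, parent, dist, Q) ((j : Nat) : Int) =
          (colors.set j 1, parent.set j (some u),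
           dist.set j (dist.getD ku (-1) + 1), Q ++ [((j : Nat) : Int)]) := by
        unfold bfsStep; rw [if_pos hfire]; simp [hdku]
      rw [hstep]
      have hclen1 : (colors.set j 1).length = G.length := by simp [hclen]
      have hdlen1 : (dist.set j (dist.getD ku (-1) + 1)).length = G.length := by simp [hdlen]
      have hlink1 : ∀ k, k < G.length →
          ((dist.set j (dist.getD ku (-1) + 1)).getD k (-1) > -1 ↔ (colors.set j 1).getD k 0 ≠ 0) := by
        intro k hk
        rw [getDset _ _ _ _ _ hjld, getDset _ _ _ _ _ hjl]
        by_cases hkj : k = j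
        · rw [if_pos hkj, if_pos hkj]
          exact ⟨fun _ => one_ne_zero, fun _ => by omega⟩
        · rw [if_neg hkj, if_neg hkj]; exact hlink k hk
      have hku1 : (colors.set j 1).getD ku 0 ≠ 0 := by
        rw [getDset _ _ _ _ _ hjl, if_neg (Ne.symm hjku)]; exact hku
      obtain ⟨a1, a2, b, c, d, h, i, f, g, link, hkuf⟩ :=
        ihl (colors.set j 1) (parent.set j (some u)) (dist.set j (dist.getD ku (-1) + 1))
          (Q ++ [((j : Nat) : Int)]) hclen1 hdlen1 hlink1 hku1 hl'
      have hselfne : (colors.set j 1).getD j 0 ≠ 0 := by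
        rw [getDset _ _ _ _ _ hjl, if_pos rfl]; exact one_ne_zero
      have hother : ∀ k, k ≠ j → (colors.set j 1).getD k 0 = colors.getD k 0 := by
        intro k hk; rw [getDset _ _ _ _ _ hjl, if_neg hk]
      refine ⟨a1, a2, ?_, ?_, ?_, ?_, ?_, ?_, ?_, link, hkuf⟩
      · intro k hk
        by_cases hkj : k = j
        · subst hkj; exact b k hselfne
        · exact b k (by rw [hother k hkj]; exact hk)
      · intro k hk hr
        rcases c k hk hr with h1 | h2
        · by_cases hkj : k = j
          · subst hkj; exact Or.inr hedge
          · rw [hother k hkj] at h1; exact Or.inl h1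
        · exact Or.inr h2
      · intro y hy
        rcases d y hy with hy1 | ⟨j', rfl, hj', hc0, hcf⟩
        · rcases List.mem_append.1 hy1 with hy2 | hy3
          · exact Or.inl hy2
          · rw [List.mem_singleton] at hy3; subst hy3
            exact Or.inr ⟨j, rfl, hj, hcj, b j hselfne⟩
        · have hj'j : j' ≠ j := by
            intro hh; subst hh; exact hselfne hc0
          rw [hother j' hj'j] at hc0
          exact Or.inr ⟨j', rfl, hj', hc0, hcf⟩
      · intro y hy; exact h y (List.mem_append_left _ hy)
      · intro j' hj' hc0 hcf
        by_cases hjj : j' = j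
        · subst hjj; exact h _ (by simp)
        · refine i j' hj' ?_ hcf
          rw [hother j' hjj]; exact hc0
      · have hgc : colors[j] = 0 := by
          rw [List.getD_eq_getElem?_getD, List.getElem?_eq_getElem hjl] at hcj; exact hcj
        have hpos : 0 < colors.countP (· == (0 : Int)) :=
          List.countP_pos_iff.mpr ⟨colors[j], List.getElem_mem hjl, by simp [hgc]⟩
        have hc1 : (colors.set j 1).countP (· == (0 : Int)) = colors.countP (· == (0 : Int)) - 1 := by
          rw [List.countP_set hjl]; simp [hgc]
        refine le_trans f ?_
        rw [hc1]; simp only [List.length_append, List.length_cons, List.length_nil]; omega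
      · intro y hy j' hyj'
        rcases List.mem_cons.1 hy with rfl | hy2
        · have : j = j' := Int.natCast_inj.mp hyj'
          subst this; exact b j hselfne
        · exact g y hy2 j' hyj'
    · have hcj : colors.getD j 0 ≠ 0 := by rwa [PySem.List.pyGetD_natCast] at hfire
      have hstep : bfsStep u (colors, parent, dist, Q) ((j : Nat) : Int) = (colors, parent, dist, Q) := by
        unfold bfsStep; rw [if_neg hfire]
      rw [hstep]
      obtain ⟨a1, a2, b, c, d, h, i, f, g, link, hkuf⟩ := ihl colors parent dist Q hclen hdlen hlink hku hl'
      refine ⟨a1, a2, b, c, d, h, i, f, ?_, link, hkuf⟩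
      intro y hy j' hyj'
      rcases List.mem_cons.1 hy with rfl | hy2
      · have : j = j' := Int.natCast_inj.mp hyj'
        subst this; exact b j hcj
      · exact g y hy2 j' hyj'

-- invariant of A's while-loop
def InvA (G : List (List Int)) (t : Nat) (colors dist : List Int) (Q : List Int) : Prop :=
  colors.length = G.length ∧ dist.length = G.length
  ∧ colors.getD t 0 ≠ 0
  ∧ (∀ x ∈ Q, ∃ k, PRep G.length x k ∧ colors.getD k 0 ≠ 0)
  ∧ (∀ k, k < G.length → colors.getD k 0 ≠ 0 → ReachG G t k)
  ∧ (∀ k, k < G.length → colors.getD k 0 ≠ 0 →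
       (∀ x ∈ Q, ∀ k', PRep G.length x k' → k' ≠ k) →
       ∀ j, Edge G k j → colors.getD j 0 ≠ 0)
  ∧ (∀ k, k < G.length → (dist.getD k (-1) > -1 ↔ colors.getD k 0 ≠ 0))

lemma loopA_spec (G : List (List Int)) (t : Nat) :
    ∀ fuel colors parent dist Q, InvA G t colors dist Q →
      2 * colors.countP (· == (0 : Int)) + Q.length ≤ fuel →
      ∀ k, k < G.length →
        ((bfsLoopA G G.length fuel colors parent dist Q).2.2.getD k (-1) > -1 ↔ ReachG G t k) := by
  intro fuel
  induction fuel with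
  | zero =>
    intro colors parent dist Q hinv hmu k hk
    obtain ⟨hclen, hdlen, hct, hQ, hsub, hcl, hlink⟩ := hinv
    have hc0 : colors.countP (· == (0 : Int)) = 0 := by omega
    simp only [bfsLoopA]
    show dist.getD k (-1) > -1 ↔ _
    rw [hlink k hk]
    refine ⟨hsub k hk, fun _ => ?_⟩
    have hkl : k < colors.length := by omega
    have hb : ¬ ((colors[k] == (0 : Int)) = true) := by
      intro hb
      have : 0 < colors.countP (· == (0 : Int)) :=
        List.countP_pos_iff.mpr ⟨colors[k], List.getElem_mem hkl, hb⟩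
      omega
    have hne : colors[k] ≠ 0 := by simpa using hb
    rw [List.getD_eq_getElem?_getD, List.getElem?_eq_getElem hkl]
    exact hne
  | succ fuel ihf =>
    intro colors parent dist Q hinv hmu k hk
    obtain ⟨hclen, hdlen, hct, hQ, hsub, hcl, hlink⟩ := hinv
    cases Q with
    | nil =>
      simp only [bfsLoopA]
      show dist.getD k (-1) > -1 ↔ _
      rw [hlink k hk]
      exact ⟨hsub k hk, fun hr => reach_closed G t (fun k => colors.getD k 0 ≠ 0) hct
        (fun k hkn hPk j e => hcl k hkn hPk (by simp) j e) k hr⟩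
    | cons u Qrest =>
      obtain ⟨ku, hrepu, hcku⟩ := hQ u List.mem_cons_self
      simp only [bfsLoopA]
      rw [PySem.List.foldl_append_ite_eq_filter
        (fun i => PySem.List.pyGetD (PySem.List.pyGetD G u []) i 0 ≠ 0), List.nil_append]
      have hlnb : ∀ x ∈ (PySem.List.pyRange 0 (G.length : Int) 1).filter
          (fun i => decide (PySem.List.pyGetD (PySem.List.pyGetD G u []) i 0 ≠ 0)),
          ∃ j : Nat, x = (j : Int) ∧ j < G.length ∧ Edge G ku j := by
        intro x hx
        rw [List.mem_filter] at hx
        obtain ⟨hx1, hx2⟩ := hx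
        rw [PySem.List.mem_pyRange_one] at hx1
        refine ⟨x.toNat, by omega, by omega, ?_⟩
        have hxx : x = ((x.toNat : Nat) : Int) := by omega
        rw [hxx] at hx2
        exact (testB_iff G u ku x.toNat hrepu (by omega)).1 (of_decide_eq_true hx2)
      obtain ⟨a1, a2, b, c, d, h, i, f, g, link, hkuf⟩ :=
        foldA_spec G u ku hrepu _ colors parent dist Qrest hclen hdlen hlink hcku hlnb
      set s := ((PySem.List.pyRange 0 (G.length : Int) 1).filter
        (fun i => decide (PySem.List.pyGetD (PySem.List.pyGetD G u []) i 0 ≠ 0))).foldl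
        (bfsStep u) (colors, parent, dist, Qrest) with hs
      have hkus : ku < s.1.length := by rw [a1]; exact hrepu.1
      have hc2 : PySem.List.pySetD s.1 u 2 = s.1.set ku 2 := rep_pySetD hrepu s.1 a1 2
      rw [hc2]
      have hbr : ∀ k', ((s.1.set ku 2).getD k' 0 ≠ 0 ↔ s.1.getD k' 0 ≠ 0) := by
        intro k'
        rw [getDset _ _ _ _ _ hkus]
        by_cases hkj : k' = ku
        · rw [if_pos hkj]; subst hkj
          exact ⟨fun _ => hkuf, fun _ => two_ne_zero⟩
        · rw [if_neg hkj]
      have hg1 : s.1.getD ku 0 = s.1[ku] := by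
        rw [List.getD_eq_getElem?_getD, List.getElem?_eq_getElem hkus]; rfl
      have hcount : (s.1.set ku 2).countP (· == (0 : Int)) = s.1.countP (· == (0 : Int)) := by
        rw [List.countP_set hkus]
        have hne : s.1[ku] ≠ 0 := by rw [← hg1]; exact hkuf
        simp [hne]
      apply ihf (s.1.set ku 2) s.2.1 s.2.2.1 s.2.2.2 ?_ ?_ k hk
      · refine ⟨by simp [a1], a2, (hbr t).2 (b t hct), ?_, ?_, ?_, fun k' hk' => (link k' hk').trans (hbr k').symm⟩
        · intro x hx
          rcases d x hx with hx1 | ⟨j, rfl, hj, _, hcf⟩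
          · obtain ⟨k', hrep', hc'⟩ := hQ x (List.mem_cons_of_mem _ hx1)
            exact ⟨k', hrep', (hbr k').2 (b _ hc')⟩
          · exact ⟨j, prep_self hj, (hbr j).2 hcf⟩
        · intro k' hk' hcv
          rcases c k' hk' ((hbr k').1 hcv) with h1 | h2
          · exact hsub k' hk' h1
          · exact Relation.ReflTransGen.tail (hsub ku hrepu.1 hcku) h2
        · intro k' hk' hcv hnotin j e
          refine (hbr j).2 ?_
          replace hcv := (hbr k').1 hcv
          by_cases hkk : k' = ku
          · have e' : Edge G ku j := hkk ▸ e
            refine g ((j : Nat) : Int) ?_ j rfl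
            rw [List.mem_filter]
            refine ⟨?_, decide_eq_true ((testB_iff G u ku j hrepu e'.2.1).2 e')⟩
            rw [PySem.List.mem_pyRange_one]
            have := e'.2.1
            omega
          · by_cases hck : colors.getD k' 0 ≠ 0
            · refine b _ (hcl k' hk' hck ?_ j e)
              intro x hx k'' hrep''
              rcases List.mem_cons.1 hx with rfl | hx2
              · have : k'' = ku := prep_unique hrep'' hrepu
                omega
              · exact hnotin x (h x hx2) k'' hrep''
            · have hc0 : colors.getD k' 0 = 0 := by
                by_contra hcc; exact hck hcc
              exact absurd rfl (hnotin _ (i k' hk' hc0 hcv) k' (prep_self hk'))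
      · rw [hcount]
        refine le_trans f ?_
        simp only [List.length_cons] at hmu; omega

-- ===== VERDICT (by name: the statement is the Claim_ definition above) =====
theorem BFS_vertex_spec : Claim_equal_BFS_vertex := by
  intro G v _ hpre
  obtain ⟨h1, h2, _⟩ := hpre
  unfold Spec_BFS_vertex
  have hn : 0 < G.length := by omega
  set t : Nat := if 0 ≤ v then v.toNat else (v + G.length).toNat with htdef
  have hrep : PRep G.length v t := by
    refine ⟨?_, ?_⟩ <;> rw [htdef] <;> split_ifs <;> omega
  have ht : t < G.length := hrep.1
  have hrtC : t < (List.replicate G.length (0 : Int)).length := by simp [ht]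
  have hrtD : t < (List.replicate G.length (-1 : Int)).length := by simp [ht]
  have hrtV : t < (List.replicate G.length false).length := by simp [ht]
  have eC : PySem.List.pySetD (List.replicate G.length (0 : Int)) v 1 =
      (List.replicate G.length (0 : Int)).set t 1 := rep_pySetD hrep _ (by simp) 1
  have eD : PySem.List.pySetD (List.replicate G.length (-1 : Int)) v 0 =
      (List.replicate G.length (-1 : Int)).set t 0 := rep_pySetD hrep _ (by simp) 0
  have eV : PySem.List.pySetD (List.replicate G.length false) v true =
      (List.replicate G.length false).set t true := rep_pySetD hrep _ (by simp) true
  have hC_t : ((List.replicate G.length (0 : Int)).set t 1).getD t 0 ≠ 0 := by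
    rw [getDset _ _ _ _ _ hrtC, if_pos rfl]; exact one_ne_zero
  have hC_other : ∀ k, k ≠ t → ((List.replicate G.length (0 : Int)).set t 1).getD k 0 =
      (List.replicate G.length (0 : Int)).getD k 0 := by
    intro k hk; rw [getDset _ _ _ _ _ hrtC, if_neg hk]
  have hV_t : ((List.replicate G.length false).set t true).getD t false = true := by
    rw [getDset _ _ _ _ _ hrtV, if_pos rfl]
  have hV_other : ∀ k, k ≠ t → ((List.replicate G.length false).set t true).getD k false =
      (List.replicate G.length false).getD k false := by
    intro k hk; rw [getDset _ _ _ _ _ hrtV, if_neg hk]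
  -- invariant of A's loop at entry
  have hinvA : InvA G t ((List.replicate G.length (0 : Int)).set t 1)
      ((List.replicate G.length (-1 : Int)).set t 0) [v] := by
    have honly : ∀ k, k < G.length → ((List.replicate G.length (0 : Int)).set t 1).getD k 0 ≠ 0 → k = t := by
      intro k hk hc
      by_contra hne
      rw [hC_other k hne, List.getD_replicate _ hk] at hc
      exact hc rfl
    refine ⟨by simp, by simp, hC_t, ?_, ?_, ?_, ?_⟩
    · intro x hx
      rw [List.mem_singleton] at hx; subst hx
      exact ⟨t, hrep, hC_t⟩
    · intro k hk hc
      rw [honly k hk hc]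
      exact Relation.ReflTransGen.refl
    · intro k hk hc hnotin j e
      exact absurd (honly k hk hc).symm (hnotin v (List.mem_singleton_self v) t hrep)
    · intro k hk
      by_cases hkt : k = t
      · subst hkt
        rw [getDset _ _ _ _ _ hrtD, if_pos rfl]
        exact ⟨fun _ => hC_t, fun _ => by omega⟩
      · rw [getDset _ _ _ _ _ hrtD, if_neg hkt, hC_other k hkt,
          List.getD_replicate _ hk, List.getD_replicate _ hk]
        exact ⟨fun hh => absurd hh (by omega), fun hh => absurd rfl hh⟩
  have hgrC : (List.replicate G.length (0 : Int))[t] = 0 := List.getElem_replicate hrtC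
  have hcrepl : (List.replicate G.length (0 : Int)).countP (· == (0 : Int)) = G.length := by
    rw [List.countP_eq_length.mpr ?_, List.length_replicate]
    intro a ha; rw [List.eq_of_mem_replicate ha]; simp
  have hcset : ((List.replicate G.length (0 : Int)).set t 1).countP (· == (0 : Int)) = G.length - 1 := by
    rw [List.countP_set hrtC]
    simp [hgrC, hcrepl]
  have hmuA : 2 * ((List.replicate G.length (0 : Int)).set t 1).countP (· == (0 : Int)) +
      ([v] : List Int).length ≤ 2 * G.length + 1 := by
    rw [hcset]
    simp only [List.length_cons, List.length_nil]
    omega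
  have hA := loopA_spec G t (2 * G.length + 1) _ (List.replicate G.length none) _ [v] hinvA hmuA
  -- invariant of B's loop at entry
  have hinvB : InvB G t ((List.replicate G.length false).set t true) [v] := by
    have honly : ∀ k, k < G.length → ((List.replicate G.length false).set t true).getD k false = true → k = t := by
      intro k hk hc
      by_contra hne
      rw [hV_other k hne, List.getD_replicate _ hk] at hc
      exact Bool.noConfusion hc
    refine ⟨by simp, hV_t, ?_, ?_, ?_⟩
    · intro x hx
      rw [List.mem_singleton] at hx; subst hx
      exact ⟨t, hrep, hV_t⟩
    · intro k hk hc
      rw [honly k hk hc]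
      exact Relation.ReflTransGen.refl
    · intro k hk hc hnotin j e
      exact absurd (honly k hk hc).symm (hnotin v (List.mem_singleton_self v) t hrep)
  have hgrV : (List.replicate G.length false)[t] = false := List.getElem_replicate hrtV
  have hvset : ((List.replicate G.length false).set t true).count false = G.length - 1 := by
    rw [List.count_set hrtV]
    simp [hgrV]
  have hmuB : 2 * ((List.replicate G.length false).set t true).count false +
      ([v] : List Int).length ≤ 2 * G.length + 1 := by
    rw [hvset]
    simp only [List.length_cons, List.length_nil]
    omega
  have hB := loopB_spec G t (2 * G.length + 1) _ [v] hinvB hmuB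
  simp only [BFS_vertex, BFS_vertex_alt]
  rw [eC, eD, eV]
  rw [PySem.List.foldl_append_ite_eq_filter
      (fun i => PySem.List.pyGetD (bfsLoopA G G.length (2 * G.length + 1)
        ((List.replicate G.length (0 : Int)).set t 1) (List.replicate G.length none)
        ((List.replicate G.length (-1 : Int)).set t 0) [v]).2.2 i (-1) > -1),
    PySem.List.foldl_append_ite_eq_filter
      (fun i => PySem.List.pyGetD (dfsLoopB G G.length (2 * G.length + 1)
        ((List.replicate G.length false).set t true) [v]) i false = true),
    List.nil_append, List.nil_append]
  apply List.filter_congr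
  intro x hx
  rw [PySem.List.mem_pyRange_one] at hx
  have hxx : x = ((x.toNat : Nat) : Int) := by omega
  have hkn : x.toNat < G.length := by omega
  rw [hxx]
  simp only [PySem.List.pyGetD_natCast]
  rw [decide_eq_decide]
  exact (hA x.toNat hkn).trans (hB x.toNat hkn).symm
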